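-- pv_equiv track=rewrite | github.com/paiv/everybody-codes | 2024/q03.py | part1
-- ===== SOURCE A (Python) =====
-- import itertools
--
-- def part1(data):
--     grid = {(x + 1j * y):1
--         for y,row in enumerate(data.strip().splitlines())
--         for x,c in enumerate(row)
--         if c == '#'}
--     ans = len(grid)
--     ds = [0, 1, -1, 1j, -1j]
--     for i in itertools.count(1):
--         state = dict(grid)
--         for k,v in state.items():
--             if all(state.get(k+d) == i for d in ds):
--                 grid[k] = i + 1
--         n = list(grid.values()).count(i+1)
--         ans += n
--         if not n: break
--     return ans
-- ===== SOURCE B (Python) =====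
-- def part1(data):
--     cells = {(x, y)
--              for y, row in enumerate(data.strip().splitlines())
--              for x, c in enumerate(row)
--              if c == '#'}
--     if not cells:
--         return 0
--     x0 = min(x for x, y in cells) - 1
--     x1 = max(x for x, y in cells) + 1
--     y0 = min(y for x, y in cells) - 1
--     y1 = max(y for x, y in cells) + 1
--     holes = [(hx, hy)
--              for hy in range(y0, y1 + 1)
--              for hx in range(x0, x1 + 1)
--              if (hx, hy) not in cells]
--     return sum(min(abs(x - hx) + abs(y - hy) for hx, hy in holes)
--                for x, y in cells)
-- ===== Notes on version B (the rewrite author's own statement) =====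
-- stated objective: alternative
-- what changed: B has no erosion loop at all: it uses the fact that a cell's erosion depth equals its Manhattan (L1) distance to the nearest non-# position (grid holes or the one-cell border around the bounding box) and returns the sum of these per-cell distances, computed directly from the static grid.
import Mathlib
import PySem

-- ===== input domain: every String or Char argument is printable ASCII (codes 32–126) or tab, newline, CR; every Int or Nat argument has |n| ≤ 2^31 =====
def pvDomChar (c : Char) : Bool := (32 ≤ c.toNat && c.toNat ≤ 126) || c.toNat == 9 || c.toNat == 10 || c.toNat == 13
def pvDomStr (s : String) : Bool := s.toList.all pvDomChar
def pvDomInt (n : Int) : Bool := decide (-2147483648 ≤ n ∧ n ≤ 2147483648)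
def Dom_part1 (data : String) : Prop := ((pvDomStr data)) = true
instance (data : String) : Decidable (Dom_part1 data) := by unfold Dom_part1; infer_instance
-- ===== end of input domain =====

-- B replaces A's round-by-round erosion of a dict of levels by a direct distance-transform sum:
-- a cell's erosion depth is its L1 distance to the nearest non-'#' position, summed over all cells.

-- ===== PORT A =====
-- Python complex keys x + 1j*y carry integer coordinates only; they are represented exactly
-- as pairs (x, y) with componentwise addition and equality.
def pvA_ds : List (Int × Int) := [(0,0),(1,0),(-1,0),(0,1),(0,-1)]

-- the `for i in itertools.count(1)` loop; the Nat fuel only makes the recursion total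
-- (grid.size + 1 rounds are provably enough, see the fuel lemmas below)
def pvA_loop : Nat → Int → PySem.Dict (Int × Int) Int → Int → Int
  | 0, _, _, ans => ans
  | f+1, i, grid, ans =>
      let state := grid
      let grid' := state.items.foldl
        (fun g kv =>
          if pvA_ds.all (fun d => state.get? (kv.1.1 + d.1, kv.1.2 + d.2) == some i)
          then g.insert kv.1 (i+1) else g) grid
      let n : Int := (PySem.List.count grid'.values (i+1) : Int)
      let ans' := ans + n
      if n = 0 then ans' else pvA_loop f (i+1) grid' ans'

def part1 (data : String) : Int :=
  let grid : PySem.Dict (Int × Int) Int :=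
    (PySem.List.enumerate (PySem.Str.splitlines (PySem.Str.strip data))).foldl
      (fun g yrow => (PySem.List.enumerate yrow.2.toList).foldl
        (fun g xc => if xc.2 = '#' then g.insert (xc.1, yrow.1) (1:Int) else g) g)
      (PySem.Dict.mk [])
  pvA_loop (grid.size + 1) 1 grid (grid.size : Int)

-- ===== PORT B =====
-- the set-comprehension generator of Source B
def pvB_gen (data : String) : List (Int × Int) :=
  (PySem.List.enumerate (PySem.Str.splitlines (PySem.Str.strip data))).flatMap
    (fun yrow => (PySem.List.enumerate yrow.2.toList).filterMap
      (fun xc => if xc.2 = '#' then some (xc.1, yrow.1) else none))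

def part1_alt (data : String) : Int :=
  let cells : PySem.Set (Int × Int) := PySem.Set.ofList (pvB_gen data)
  if cells.isEmpty then 0
  else
    -- min/max over a nonempty iterable; the `.getD 0` default is unreachable (cells ≠ ∅)
    let x0 : Int := (PySem.List.min? (cells.map (fun c => c.1)) (fun v => v)).getD 0 - 1
    let x1 : Int := (PySem.List.max? (cells.map (fun c => c.1)) (fun v => v)).getD 0 + 1
    let y0 : Int := (PySem.List.min? (cells.map (fun c => c.2)) (fun v => v)).getD 0 - 1
    let y1 : Int := (PySem.List.max? (cells.map (fun c => c.2)) (fun v => v)).getD 0 + 1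
    let holes : List (Int × Int) :=
      (PySem.List.pyRange y0 (y1 + 1) 1).flatMap (fun hy =>
        (PySem.List.pyRange x0 (x1 + 1) 1).filterMap (fun hx =>
          if PySem.Set.contains cells (hx, hy) then none else some (hx, hy)))
    (cells.map (fun c =>
      (PySem.List.min? (holes.map (fun h => |c.1 - h.1| + |c.2 - h.2|)) (fun v => v)).getD 0)).sum

-- ===== PRECONDITION & SPEC =====
def Spec_part1 (data : String) (out : Int) : Prop := out = part1_alt data
instance (data : String) (out : Int) : Decidable (Spec_part1 data out) := by unfold Spec_part1; infer_instance

-- ===== CLAIM (what is proved, stated in full; the proofs are below) =====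
def Claim_equal_part1 : Prop := ∀ (data : String), Dom_part1 data → Spec_part1 data (part1 data)

-- ===== LEMMAS AND PROOFS =====

-- ---- proof-side vocabulary: erosion as layer peeling on a duplicate-free list of cells ----
def pvErode (cells : List (Int × Int)) : List (Int × Int) :=
  cells.filter (fun c =>
    PySem.Set.contains cells (c.1 - 1, c.2) && PySem.Set.contains cells (c.1 + 1, c.2) &&
    PySem.Set.contains cells (c.1, c.2 - 1) && PySem.Set.contains cells (c.1, c.2 + 1))

def pvPeel : Nat → List (Int × Int) → Int → Int
  | 0, _, total => total
  | f+1, cells, total =>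
      if cells.isEmpty then total
      else pvPeel f (pvErode cells) (total + (cells.length : Int))

-- L1 distance and the ball-containment predicate
def pvDistN (c q : Int × Int) : Nat := (c.1 - q.1).natAbs + (c.2 - q.2).natAbs

def pvBall (S : List (Int × Int)) (c : Int × Int) (k : Nat) : Prop :=
  ∀ q, pvDistN c q ≤ k → q ∈ S

-- B's bounding box, holes list and per-cell minimum distance, as standalone functions of the cell list
def pvX0 (S : List (Int × Int)) : Int := (PySem.List.min? (S.map (fun c => c.1)) (fun v => v)).getD 0 - 1
def pvX1 (S : List (Int × Int)) : Int := (PySem.List.max? (S.map (fun c => c.1)) (fun v => v)).getD 0 + 1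
def pvY0 (S : List (Int × Int)) : Int := (PySem.List.min? (S.map (fun c => c.2)) (fun v => v)).getD 0 - 1
def pvY1 (S : List (Int × Int)) : Int := (PySem.List.max? (S.map (fun c => c.2)) (fun v => v)).getD 0 + 1
def pvHoles (S : List (Int × Int)) : List (Int × Int) :=
  (PySem.List.pyRange (pvY0 S) (pvY1 S + 1) 1).flatMap (fun hy =>
    (PySem.List.pyRange (pvX0 S) (pvX1 S + 1) 1).filterMap (fun hx =>
      if PySem.Set.contains S (hx, hy) then none else some (hx, hy)))
def pvMD (S : List (Int × Int)) (c : Int × Int) : Int :=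
  (PySem.List.min? ((pvHoles S).map (fun h => |c.1 - h.1| + |c.2 - h.2|)) (fun v => v)).getD 0

-- B's generator list is duplicate-free (distinct (x, y) positions)
lemma pvB_gen_nodup (data : String) : (pvB_gen data).Nodup := by
  unfold pvB_gen
  rw [List.nodup_flatMap]
  constructor
  · intro yrow _
    have hp := PySem.List.pairwise_lt_enumerate yrow.2.toList 0
    apply List.Pairwise.imp (R := fun (a b : Int × Int) => a.1 < b.1)
    · intro a b hab he
      rw [he] at hab; exact lt_irrefl _ hab
    · rw [List.pairwise_filterMap]
      apply hp.imp
      intro a b hab u hu v hv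
      have ha : u.1 = a.1 := by
        by_cases h : a.2 = '#' <;> simp [h] at hu; rw [← hu]
      have hb : v.1 = b.1 := by
        by_cases h : b.2 = '#' <;> simp [h] at hv; rw [← hv]
      rw [ha, hb]; exact hab
  · have hp := PySem.List.pairwise_lt_enumerate (PySem.Str.splitlines (PySem.Str.strip data)) 0
    apply hp.imp
    intro a b hab x hx hy
    have hx2 : x.2 = a.1 := by
      rcases List.mem_filterMap.1 hx with ⟨u, _, hu⟩
      by_cases h : u.2 = '#' <;> simp [h] at hu; rw [← hu]
    have hy2 : x.2 = b.1 := by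
      rcases List.mem_filterMap.1 hy with ⟨u, _, hu⟩
      by_cases h : u.2 = '#' <;> simp [h] at hu; rw [← hu]
    rw [hx2] at hy2
    exact lt_irrefl _ (hy2 ▸ hab)

lemma pvSet_add_aux {α : Type} [BEq α] [LawfulBEq α] :
    ∀ (l acc : List α), (∀ x ∈ l, x ∉ acc) → l.Nodup → List.foldl PySem.Set.add acc l = acc ++ l := by
  intro l
  induction l with
  | nil => simp
  | cons x t ih =>
      intro acc hfr hnd
      have hx : PySem.Set.contains acc x = false := by
        simp only [PySem.Set.contains, List.contains_eq_mem, decide_eq_false_iff_not]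
        exact hfr x (by simp)
      rw [List.foldl_cons,
        show PySem.Set.add acc x = acc ++ [x] by
          simp only [PySem.Set.add, hx, Bool.false_eq_true, if_false]]
      rw [ih (acc ++ [x]) ?_ (by simp at hnd; exact hnd.2)]
      · simp
      · intro y hy
        simp only [List.mem_append, List.mem_singleton]
        push Not
        refine ⟨hfr y (by simp [hy]), ?_⟩
        rintro rfl; simp at hnd; exact hnd.1 hy

-- set(…) of a duplicate-free generator is that list itself
lemma pvSet_ofList_nodup {α : Type} [BEq α] [LawfulBEq α] (l : List α) (h : l.Nodup) :
    PySem.Set.ofList l = l := by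
  have := pvSet_add_aux l [] (by simp) h
  simpa [PySem.Set.ofList, PySem.Set.empty] using this


lemma pvRow_fold (y : Int) : ∀ (l : List (Int × Char)) (g : PySem.Dict (Int × Int) Int),
    l.foldl (fun g xc => if xc.2 = '#' then g.insert (xc.1, y) (1:Int) else g) g
      = (l.filterMap (fun xc => if xc.2 = '#' then some (xc.1, y) else none)).foldl
          (fun g k => g.insert k (1:Int)) g := by
  intro l
  induction l with
  | nil => simp
  | cons xc t ih =>
      intro g
      by_cases h : xc.2 = '#'
      · simp only [List.foldl_cons, List.filterMap_cons, if_pos h]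
        exact ih _
      · simp only [List.foldl_cons, List.filterMap_cons, if_neg h]
        exact ih g

-- A's dict comprehension builds exactly the generator keys, each with value 1
lemma pvA_grid_items (data : String) :
    ((PySem.List.enumerate (PySem.Str.splitlines (PySem.Str.strip data))).foldl
      (fun g yrow => (PySem.List.enumerate yrow.2.toList).foldl
        (fun (g : PySem.Dict (Int × Int) Int) xc =>
          if xc.2 = '#' then g.insert (xc.1, yrow.1) (1:Int) else g) g)
      (PySem.Dict.mk [])).items = (pvB_gen data).map (fun k => (k, (1:Int))) := by
  have h1 : ∀ (rows : List (Int × String)) (g : PySem.Dict (Int × Int) Int),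
      rows.foldl (fun g yrow => (PySem.List.enumerate yrow.2.toList).foldl
        (fun (g : PySem.Dict (Int × Int) Int) xc =>
          if xc.2 = '#' then g.insert (xc.1, yrow.1) (1:Int) else g) g) g
      = (rows.flatMap (fun yrow => (PySem.List.enumerate yrow.2.toList).filterMap
          (fun xc => if xc.2 = '#' then some (xc.1, yrow.1) else none))).foldl
          (fun g k => g.insert k (1:Int)) g := by
    intro rows g
    rw [List.foldl_flatMap]
    apply PySem.List.foldl_congr_mem
    intro acc a _
    exact pvRow_fold a.1 _ acc
  rw [h1]
  have := PySem.Dict.items_foldl_insert_fresh (pvB_gen data) (fun k => k) (fun _ => (1:Int))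
    (PySem.Dict.mk []) (by intro a _; simp [PySem.Dict.contains]) (by simpa using pvB_gen_nodup data)
  simpa [pvB_gen] using this

lemma pvFind_map (v : (Int × Int) → Int) (q : Int × Int) :
    ∀ (S : List (Int × Int)),
    Option.map (fun x => x.2) (List.find? (fun p => p.1 == q) (S.map (fun k => (k, v k))))
      = if q ∈ S then some (v q) else none := by
  intro S
  induction S with
  | nil => simp
  | cons s t ih =>
      rw [List.map_cons]
      by_cases hq : s = q
      · subst hq
        rw [List.find?_cons_of_pos (by simp)]
        simp
      · rw [List.find?_cons_of_neg (by simp [hq])]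
        rw [ih]
        simp [Ne.symm hq]

-- lookup in a dict whose items are a map over a key list
lemma pvDict_get?_of_items_map (S : List (Int × Int)) (v : (Int × Int) → Int)
    (d : PySem.Dict (Int × Int) Int) (h : d.items = S.map (fun k => (k, v k))) (q : Int × Int) :
    d.get? q = if q ∈ S then some (v q) else none := by
  simp only [PySem.Dict.get?, h]
  exact pvFind_map v q S

lemma pvInsert_existing (g : PySem.Dict (Int × Int) Int) (k : Int × Int) (v w : Int)
    (pre rest : List ((Int × Int) × Int))
    (h : g.items = pre ++ (k, v) :: rest)
    (hpre : ∀ p ∈ pre, p.1 ≠ k) (hrest : ∀ p ∈ rest, p.1 ≠ k) :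
    (g.insert k w).items = pre ++ (k, w) :: rest := by
  have hc : g.contains k = true := by
    simp only [PySem.Dict.contains, h, List.any_append, List.any_cons]
    simp
  simp only [PySem.Dict.insert, hc, if_true, h, List.map_append, List.map_cons]
  congr 1
  · calc List.map (fun p => if (p.1 == k) = true then (k, w) else p) pre
        = List.map id pre := List.map_congr_left (fun a ha => by simp [hpre a ha])
      _ = pre := by simp
  · congr 1
    · simp
    · calc List.map (fun p => if (p.1 == k) = true then (k, w) else p) rest
          = List.map id rest := List.map_congr_left (fun a ha => by simp [hrest a ha])
        _ = rest := by simp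

-- the round fold: overwriting existing (duplicate-free) keys rewrites items in place
lemma pvA_round_items (P : (Int × Int) → Bool) (w : Int) :
    ∀ (l pre : List ((Int × Int) × Int)) (g : PySem.Dict (Int × Int) Int),
    g.items = pre ++ l → ((pre ++ l).map (·.1)).Nodup →
    (l.foldl (fun g kv => if P kv.1 then g.insert kv.1 w else g) g).items
      = pre ++ l.map (fun kv => if P kv.1 then (kv.1, w) else kv) := by
  intro l
  induction l with
  | nil => intro pre g hg _; simpa using hg
  | cons kv rest ih =>
      intro pre g hg hnd
      rw [List.foldl_cons]
      by_cases hP : P kv.1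
      · have hkeys : ∀ p ∈ pre, p.1 ≠ kv.1 := by
          intro p hp
          have h' := hnd
          rw [List.map_append, List.nodup_append] at h'
          intro he
          exact h'.2.2 p.1 (List.mem_map_of_mem hp) kv.1
            (List.mem_map_of_mem (List.mem_cons_self)) he
        have hrest : ∀ p ∈ rest, p.1 ≠ kv.1 := by
          have h' : ((kv :: rest).map (·.1)).Nodup := by
            rw [List.map_append, List.nodup_append] at hnd; exact hnd.2.1
          simp only [List.map_cons, List.nodup_cons] at h'
          intro p hp he
          exact h'.1 (by rw [← he]; exact List.mem_map_of_mem hp)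
        have hins := pvInsert_existing g kv.1 kv.2 w pre rest (by simpa using hg) hkeys hrest
        rw [if_pos hP]
        have := ih (pre ++ [(kv.1, w)]) (g.insert kv.1 w) (by simpa using hins)
          (by
            have he : ((pre ++ [(kv.1, w)]) ++ rest).map (·.1)
                = (pre ++ kv :: rest).map (·.1) := by simp
            rw [he]; exact hnd)
        simpa [List.map_cons, if_pos hP] using this
      · rw [if_neg hP]
        have := ih (pre ++ [kv]) g (by simpa using hg)
          (by
            have he : ((pre ++ [kv]) ++ rest).map (·.1)
                = (pre ++ kv :: rest).map (·.1) := by simp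
            rw [he]; exact hnd)
        simpa [List.map_cons, if_neg hP] using this

lemma pvPeel_nil (f : Nat) (t : Int) : pvPeel f [] t = t := by
  cases f <;> simp [pvPeel, List.isEmpty]

lemma pvPeel_acc (f : Nat) : ∀ (cells : List (Int × Int)) (t : Int),
    pvPeel f cells t = t + pvPeel f cells 0 := by
  induction f with
  | zero => intro cells t; simp [pvPeel]
  | succ f ih =>
      intro cells t
      by_cases h : cells.isEmpty
      · simp [pvPeel, h]
      · simp only [pvPeel, h, if_neg, Bool.not_eq_true] at *
        rw [ih (pvErode cells) (t + cells.length), ih (pvErode cells) (0 + cells.length)]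
        ring

lemma pvExists_max_fst : ∀ (l : List (Int × Int)), l ≠ [] → ∃ a ∈ l, ∀ b ∈ l, b.1 ≤ a.1 := by
  intro l
  induction l with
  | nil => simp
  | cons x t ih =>
      intro _
      rcases eq_or_ne t [] with rfl | ht
      · exact ⟨x, by simp⟩
      · obtain ⟨a, ha, hmax⟩ := ih ht
        rcases le_total a.1 x.1 with h | h
        · refine ⟨x, by simp, ?_⟩
          intro b hb
          rcases List.mem_cons.1 hb with rfl | hb
          · exact le_refl _
          · exact le_trans (hmax b hb) h
        · refine ⟨a, by simp [ha], ?_⟩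
          intro b hb
          rcases List.mem_cons.1 hb with rfl | hb
          · exact h
          · exact hmax b hb

-- erosion of a nonempty set removes its rightmost cell
lemma pvErode_lt (cells : List (Int × Int)) (h : cells ≠ []) :
    (pvErode cells).length < cells.length := by
  obtain ⟨a, ha, hmax⟩ := pvExists_max_fst cells h
  unfold pvErode
  rw [List.length_filter_lt_length_iff_exists]
  refine ⟨a, ha, ?_⟩
  intro hp
  simp only [Bool.and_eq_true, PySem.Set.contains, List.contains_eq_mem,
    decide_eq_true_eq] at hp
  have := hmax _ hp.1.1.2
  omega


lemma pvPeel_fuel : ∀ (n : Nat) (cells : List (Int × Int)) (t : Int) (f f' : Nat),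
    cells.length ≤ n → n < f → n < f' → pvPeel f cells t = pvPeel f' cells t := by
  intro n
  induction n using Nat.strong_induction_on with
  | h n ih =>
      intro cells t f f' hlen hf hf'
      obtain ⟨a, rfl⟩ : ∃ a, f = a + 1 := ⟨f - 1, by omega⟩
      obtain ⟨b, rfl⟩ : ∃ b, f' = b + 1 := ⟨f' - 1, by omega⟩
      by_cases he : cells.isEmpty
      · simp [pvPeel, he]
      · simp only [pvPeel, he, Bool.false_eq_true, if_false]
        have hne : cells ≠ [] := by simpa [List.isEmpty_iff] using he
        have hlt := pvErode_lt cells hne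
        have hpos : 0 < cells.length := List.length_pos_iff.2 hne
        exact ih (n - 1) (by omega) _ _ a b (by omega) (by omega) (by omega)

-- the lockstep simulation: one round of A's dict loop is one erosion of the peeled set
lemma pvA_loop_eq (S : List (Int × Int)) (hnd : S.Nodup) :
    ∀ (f : Nat) (i : Int) (v : (Int × Int) → Int) (g : PySem.Dict (Int × Int) Int) (acc : Int),
    g.items = S.map (fun k => (k, v k)) →
    (∀ k ∈ S, v k ≤ i) →
    pvA_loop f i g acc = acc + pvPeel f (pvErode (S.filter (fun k => v k == i))) 0 := by
  intro f
  induction f with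
  | zero => intro i v g acc _ _; simp [pvA_loop, pvPeel]
  | succ f ih =>
      intro i v g acc hitems hle
      have hget : ∀ q, g.get? q = if q ∈ S then some (v q) else none :=
        pvDict_get?_of_items_map S v g hitems
      have hPk : ∀ k : Int × Int,
          (pvA_ds.all (fun d => g.get? (k.1 + d.1, k.2 + d.2) == some i) = true)
            ↔ (k ∈ S.filter (fun k => v k == i) ∧
               (k.1 - 1, k.2) ∈ S.filter (fun k => v k == i) ∧
               (k.1 + 1, k.2) ∈ S.filter (fun k => v k == i) ∧
               (k.1, k.2 - 1) ∈ S.filter (fun k => v k == i) ∧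
               (k.1, k.2 + 1) ∈ S.filter (fun k => v k == i)) := by
        intro k
        have hopt : ∀ (q : Int × Int), ((g.get? q == some i) = true) ↔ (q ∈ S ∧ v q = i) := by
          intro q; rw [hget q]; split_ifs with h <;> simp [h]
        simp only [pvA_ds, List.all_cons, List.all_nil, Bool.and_true, Bool.and_eq_true]
        rw [hopt, hopt, hopt, hopt, hopt]
        obtain ⟨kx, ky⟩ := k
        simp only [List.mem_filter, beq_iff_eq, add_zero, sub_eq_add_neg]
        tauto
      have hndk : (g.items.map (·.1)).Nodup := by
        rw [hitems, List.map_map]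
        rw [show ((fun (x : (Int × Int) × Int) => x.1) ∘ fun k => (k, v k)) = id from rfl,
          List.map_id]
        exact hnd
      have hfold := pvA_round_items
        (fun k => pvA_ds.all (fun d => g.get? (k.1 + d.1, k.2 + d.2) == some i)) (i+1)
        g.items [] g rfl (by simpa using hndk)
      -- items of the dict after one round
      have hGitems : (g.items.foldl
          (fun g' kv => if pvA_ds.all (fun d => g.get? (kv.1.1 + d.1, kv.1.2 + d.2) == some i)
            then g'.insert kv.1 (i+1) else g') g).items
          = S.map (fun k => (k, if pvA_ds.all (fun d => g.get? (k.1 + d.1, k.2 + d.2) == some i)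
              then i+1 else v k)) := by
        rw [hfold]
        rw [hitems, List.map_map]
        simp only [List.nil_append]
        apply List.map_congr_left
        intro a _
        by_cases h : pvA_ds.all (fun d => g.get? (a.1 + d.1, a.2 + d.2) == some i) <;>
          simp [h]
      -- the new-value count is the size of the eroded set
      have hfiltP : S.filter (fun k => pvA_ds.all (fun d => g.get? (k.1 + d.1, k.2 + d.2) == some i))
          = pvErode (S.filter (fun k => v k == i)) := by
        unfold pvErode
        rw [List.filter_filter]
        apply List.filter_congr
        intro k hk
        apply Bool.eq_iff_iff.mpr
        rw [hPk k]
        simp only [Bool.and_eq_true, PySem.Set.contains, List.contains_eq_mem,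
          decide_eq_true_eq, List.mem_filter, beq_iff_eq]
        tauto
      have hvals : (g.items.foldl
          (fun g' kv => if pvA_ds.all (fun d => g.get? (kv.1.1 + d.1, kv.1.2 + d.2) == some i)
            then g'.insert kv.1 (i+1) else g') g).values
          = S.map (fun k => if pvA_ds.all (fun d => g.get? (k.1 + d.1, k.2 + d.2) == some i)
              then i+1 else v k) := by
        simp only [PySem.Dict.values, hGitems, List.map_map]
        rfl
      have hcount : PySem.List.count ((g.items.foldl
          (fun g' kv => if pvA_ds.all (fun d => g.get? (kv.1.1 + d.1, kv.1.2 + d.2) == some i)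
            then g'.insert kv.1 (i+1) else g') g).values) (i+1)
          = (pvErode (S.filter (fun k => v k == i))).length := by
        rw [PySem.List.count, hvals, ← hfiltP, ← List.countP_eq_length_filter]
        rw [List.count, List.countP_map]
        apply List.countP_congr
        intro k hk
        by_cases h : pvA_ds.all (fun d => g.get? (k.1 + d.1, k.2 + d.2) == some i)
        · simp only [Function.comp_apply, h, if_pos]
          simp
        · have hv : v k ≤ i := hle k hk
          simp only [Function.comp_apply, h, Bool.false_eq_true, if_false]
          simp only [beq_iff_eq]
          constructor
          · intro hc; omega
          · intro hc; exact absurd hc (by simp)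
      -- one unfolding of A's loop, then the induction hypothesis
      simp only [pvA_loop]
      rw [hcount]
      by_cases hz : ((pvErode (S.filter (fun k => v k == i))).length : Int) = 0
      · rw [if_pos hz]
        have hnil : pvErode (S.filter (fun k => v k == i)) = [] := by
          apply List.length_eq_zero_iff.1
          exact_mod_cast hz
        rw [hnil, pvPeel_nil]; simp
      · rw [if_neg hz]
        have hle' : ∀ k ∈ S,
            (if pvA_ds.all (fun d => g.get? (k.1 + d.1, k.2 + d.2) == some i)
              then i+1 else v k) ≤ i + 1 := by
          intro k hk
          split
          · exact le_refl _
          · exact le_trans (hle k hk) (by omega)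
        rw [ih (i+1)
          (fun k => if pvA_ds.all (fun d => g.get? (k.1 + d.1, k.2 + d.2) == some i)
            then i+1 else v k) _ _ hGitems hle']
        have hfilt2 : S.filter (fun k =>
            (if pvA_ds.all (fun d => g.get? (k.1 + d.1, k.2 + d.2) == some i)
              then i+1 else v k) == i+1)
            = pvErode (S.filter (fun k => v k == i)) := by
          rw [← hfiltP]
          apply List.filter_congr
          intro k hk
          by_cases h : pvA_ds.all (fun d => g.get? (k.1 + d.1, k.2 + d.2) == some i)
          · simp [h]
          · have hv : v k ≤ i := hle k hk
            simp only [h, Bool.false_eq_true, if_false]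
            apply decide_eq_false
            omega
        rw [hfilt2]
        have hne : (pvErode (S.filter (fun k => v k == i))).isEmpty = false := by
          rw [List.isEmpty_eq_false_iff]
          intro h
          rw [h] at hz; simp at hz
        conv_rhs => rw [pvPeel]
        rw [hne]
        simp only [Bool.false_eq_true, if_false]
        conv_rhs => rw [pvPeel_acc]
        ring

-- A computes the layer-peeling total of the cell set
lemma part1_eq_peel (data : String) :
    part1 data = pvPeel ((pvB_gen data).length + 1) (pvB_gen data) 0 := by
  unfold part1
  simp only []
  have hitems := pvA_grid_items data
  have hsize : ((PySem.List.enumerate (PySem.Str.splitlines (PySem.Str.strip data))).foldl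
      (fun g yrow => (PySem.List.enumerate yrow.2.toList).foldl
        (fun (g : PySem.Dict (Int × Int) Int) xc =>
          if xc.2 = '#' then g.insert (xc.1, yrow.1) (1:Int) else g) g)
      (PySem.Dict.mk [])).size = (pvB_gen data).length := by
    rw [PySem.Dict.size, hitems, List.length_map]
  rw [hsize]
  rw [pvA_loop_eq (pvB_gen data) (pvB_gen_nodup data) _ 1 (fun _ => (1:Int)) _ _
    (by rw [hitems]) (by intro k _; exact le_refl _)]
  have hfl : (pvB_gen data).filter (fun _ => ((1:Int) == 1)) = pvB_gen data := by
    simp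
  rw [hfl]
  rcases eq_or_ne (pvB_gen data) [] with hnil | hne
  · rw [hnil]
    rw [show pvErode ([] : List (Int × Int)) = [] from rfl]
    simp [pvPeel_nil]
  · have hpos : 0 < (pvB_gen data).length := List.length_pos_iff.2 hne
    conv_rhs => rw [pvPeel]
    rw [show (pvB_gen data).isEmpty = false from List.isEmpty_eq_false_iff.2 hne]
    simp only [Bool.false_eq_true, if_false]
    conv_rhs => rw [pvPeel_acc]
    have hfuel : pvPeel ((pvB_gen data).length + 1) (pvErode (pvB_gen data)) 0
        = pvPeel ((pvB_gen data).length) (pvErode (pvB_gen data)) 0 := by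
      have hlt := pvErode_lt (pvB_gen data) hne
      exact pvPeel_fuel ((pvB_gen data).length - 1) _ 0 _ _ (by omega) (by omega) (by omega)
    rw [hfuel]
    ring

-- ---- membership in one erosion step ----
lemma pvMem_erode (T : List (Int × Int)) (c : Int × Int) :
    c ∈ pvErode T ↔ (c ∈ T ∧ (c.1 - 1, c.2) ∈ T ∧ (c.1 + 1, c.2) ∈ T ∧
      (c.1, c.2 - 1) ∈ T ∧ (c.1, c.2 + 1) ∈ T) := by
  simp [pvErode, List.mem_filter, PySem.Set.contains, List.contains_eq_mem, and_assoc]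

-- ---- the ball characterisation of iterated erosion ----
lemma pvBall_zero (S : List (Int × Int)) (c : Int × Int) : pvBall S c 0 ↔ c ∈ S := by
  constructor
  · intro h; exact h c (by simp [pvDistN])
  · intro h q hq
    have h1 : q.1 = c.1 ∧ q.2 = c.2 := by
      simp only [pvDistN] at hq; omega
    have : q = c := Prod.ext h1.1 h1.2
    rw [this]; exact h

lemma pvBall_succ (S : List (Int × Int)) (c : Int × Int) (k : Nat) :
    pvBall S c (k+1) ↔ (pvBall S c k ∧ pvBall S (c.1 - 1, c.2) k ∧ pvBall S (c.1 + 1, c.2) k ∧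
      pvBall S (c.1, c.2 - 1) k ∧ pvBall S (c.1, c.2 + 1) k) := by
  constructor
  · intro h
    refine ⟨?_, ?_, ?_, ?_, ?_⟩ <;>
      · intro q hq; apply h q; simp only [pvDistN] at *; omega
  · rintro ⟨h0, h1, h2, h3, h4⟩ q hq
    by_cases hk : pvDistN c q ≤ k
    · exact h0 q hk
    · rcases lt_trichotomy q.1 c.1 with hx | hx | hx
      · exact h1 q (by simp only [pvDistN] at *; omega)
      · rcases lt_trichotomy q.2 c.2 with hy | hy | hy
        · exact h3 q (by simp only [pvDistN] at *; omega)
        · exact absurd hk (by simp only [pvDistN] at *; omega)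
        · exact h4 q (by simp only [pvDistN] at *; omega)
      · exact h2 q (by simp only [pvDistN] at *; omega)

lemma pvIter_mem (S : List (Int × Int)) : ∀ (k : Nat) (c : Int × Int),
    c ∈ pvErode^[k] S ↔ pvBall S c k := by
  intro k
  induction k with
  | zero => intro c; simp [pvBall_zero]
  | succ k ih =>
      intro c
      rw [Function.iterate_succ_apply', pvMem_erode, ih, ih, ih, ih, ih, pvBall_succ]

-- ---- termination of erosion ----
lemma pvIter_nil (k : Nat) : pvErode^[k] ([] : List (Int × Int)) = [] :=
  Function.iterate_fixed rfl k

lemma pvIter_empty : ∀ (k : Nat) (S : List (Int × Int)), S.length ≤ k → pvErode^[k] S = [] := by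
  intro k
  induction k with
  | zero => intro S h; rw [Function.iterate_zero_apply]; exact List.length_eq_zero_iff.1 (by omega)
  | succ k ih =>
      intro S h
      rcases eq_or_ne S [] with rfl | hne
      · exact pvIter_nil _
      · rw [Function.iterate_succ_apply]
        exact ih _ (by have := pvErode_lt S hne; omega)

lemma pvIter_sublist (S : List (Int × Int)) : ∀ (k : Nat), List.Sublist (pvErode^[k] S) S := by
  intro k
  induction k with
  | zero => simp
  | succ k ih =>
      rw [Function.iterate_succ_apply']
      exact List.Sublist.trans List.filter_sublist ih

-- ---- the peel total as a sum of layer sizes ----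
lemma pvPeel_eq_sum : ∀ (f : Nat) (T : List (Int × Int)) (t : Int), T.length < f →
    pvPeel f T t = t + ((List.range f).map (fun k => ((pvErode^[k] T).length : Int))).sum := by
  intro f
  induction f with
  | zero => intro T t h; exact absurd h (by omega)
  | succ f ih =>
      intro T t h
      rcases eq_or_ne T [] with rfl | hne
      · rw [pvPeel_nil]
        have h0 : (List.range (f+1)).map (fun k => ((pvErode^[k] ([] : List (Int × Int))).length : Int))
            = (List.range (f+1)).map (fun _ => (0:Int)) :=
          List.map_congr_left (fun k _ => by rw [pvIter_nil]; rfl)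
        rw [h0]
        simp
      · have hE : T.isEmpty = false := List.isEmpty_eq_false_iff.2 hne
        rw [show pvPeel (f+1) T t = pvPeel f (pvErode T) (t + (T.length : Int)) by
          simp [pvPeel, hE]]
        rw [ih (pvErode T) _ (by have := pvErode_lt T hne; omega)]
        rw [List.range_succ_eq_map]
        simp only [List.map_cons, List.map_map, List.sum_cons, Function.iterate_zero_apply]
        have : ∀ k : Nat, pvErode^[k+1] T = pvErode^[k] (pvErode T) := fun k =>
          Function.iterate_succ_apply pvErode k T
        simp only [Function.comp_def, Function.iterate_succ_apply]
        ring

-- ---- filtering a nodup list down to a sublist ----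
lemma pvFilter_sublist : ∀ (l l' : List (Int × Int)), List.Sublist l' l → l.Nodup →
    l.filter (fun x => decide (x ∈ l')) = l' := by
  intro l l' h
  induction h with
  | slnil => simp
  | @cons l₁ l₂ a h ih =>
      intro hnd
      have ha : a ∉ l₂ := (List.nodup_cons.1 hnd).1
      have ha' : a ∉ l₁ := fun hm => ha (h.subset hm)
      rw [List.filter_cons]
      simp only [ha', decide_false, Bool.false_eq_true, if_false]
      exact ih (List.nodup_cons.1 hnd).2
  | @cons₂ l₁ l₂ a h ih =>
      intro hnd
      have ha : a ∉ l₂ := (List.nodup_cons.1 hnd).1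
      rw [List.filter_cons]
      simp only [List.mem_cons, true_or, decide_true, if_true]
      congr 1
      rw [List.filter_congr (l := l₂) (q := fun x => decide (x ∈ l₁)) ?_]
      · exact ih (List.nodup_cons.1 hnd).2
      · intro x hx
        have : x ≠ a := fun he => ha (he ▸ hx)
        simp [this]

-- ---- indicator sums and the double-count swap ----
lemma pvLen_filter_int {α : Type} : ∀ (l : List α) (p : α → Bool),
    ((l.filter p).length : Int) = (l.map (fun x => if p x then (1:Int) else 0)).sum := by
  intro l p
  induction l with
  | nil => simp
  | cons x t ih =>
      rw [List.filter_cons, List.map_cons, List.sum_cons, ← ih]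
      by_cases h : p x <;> simp [h] <;> push_cast <;> ring

lemma pvSum_comm {α β : Type} : ∀ (l1 : List α) (l2 : List β) (g : α → β → Int),
    (l1.map (fun a => (l2.map (g a)).sum)).sum
      = (l2.map (fun b => (l1.map (fun a => g a b)).sum)).sum := by
  intro l1
  induction l1 with
  | nil => intro l2 g; simp [List.map_const]
  | cons a t ih =>
      intro l2 g
      rw [List.map_cons, List.sum_cons, ih]
      rw [← PySem.List.sum_map_add_int]
      simp

lemma pvRange_count : ∀ (f m : Nat), m ≤ f →
    ((List.range f).map (fun k => if k < m then (1:Int) else 0)).sum = (m : Int) := by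
  intro f
  induction f with
  | zero => intro m h; interval_cases m; simp
  | succ f ih =>
      intro m h
      rw [List.range_succ, List.map_append, List.sum_append]
      simp only [List.map_cons, List.map_nil, List.sum_cons, List.sum_nil, add_zero]
      rcases eq_or_ne m (f+1) with rfl | hne
      · have hmap : (List.range f).map (fun k => if k < f+1 then (1:Int) else 0)
            = (List.range f).map (fun k => if k < f then (1:Int) else 0) := by
          apply List.map_congr_left; intro k hk
          have hkf := List.mem_range.1 hk
          simp [hkf, Nat.lt_succ_of_lt hkf]
        rw [hmap, ih f le_rfl]
        have hf : f < f + 1 := by omega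
        simp only [hf, if_true]
        push_cast; ring
      · rw [ih m (by omega)]
        have hnf : ¬ (f < m) := by omega
        simp [hnf]

-- cast of the L1 distance
lemma pvDist_cast (c h : Int × Int) : |c.1 - h.1| + |c.2 - h.2| = (pvDistN c h : Int) := by
  have h1 : |c.1 - h.1| = ((c.1 - h.1).natAbs : Int) := Int.abs_eq_natAbs _
  have h2 : |c.2 - h.2| = ((c.2 - h.2).natAbs : Int) := Int.abs_eq_natAbs _
  simp only [pvDistN, h1, h2]
  push_cast
  ring

-- ---- the bounding box ----
lemma pvBounds (S : List (Int × Int)) (c : Int × Int) (hc : c ∈ S) :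
    pvX0 S + 1 ≤ c.1 ∧ c.1 ≤ pvX1 S - 1 ∧ pvY0 S + 1 ≤ c.2 ∧ c.2 ≤ pvY1 S - 1 := by
  have hx : c.1 ∈ S.map (fun c => c.1) := List.mem_map_of_mem hc
  have hy : c.2 ∈ S.map (fun c => c.2) := List.mem_map_of_mem hc
  have hne1 : S.map (fun c => c.1) ≠ [] := by
    intro h; rw [h] at hx; exact absurd hx (by simp)
  have hne2 : S.map (fun c => c.2) ≠ [] := by
    intro h; rw [h] at hy; exact absurd hy (by simp)
  obtain ⟨m1, hm1⟩ : ∃ m, PySem.List.min? (S.map (fun c => c.1)) (fun v => v) = some m := by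
    cases hm : PySem.List.min? (S.map (fun c => c.1)) (fun v => v) with
    | none => exact absurd ((PySem.List.min?_eq_none_iff _ _).1 hm) hne1
    | some m => exact ⟨m, rfl⟩
  obtain ⟨M1, hM1⟩ : ∃ m, PySem.List.max? (S.map (fun c => c.1)) (fun v => v) = some m := by
    cases hm : PySem.List.max? (S.map (fun c => c.1)) (fun v => v) with
    | none => exact absurd ((PySem.List.max?_eq_none_iff _ _).1 hm) hne1
    | some m => exact ⟨m, rfl⟩
  obtain ⟨m2, hm2⟩ : ∃ m, PySem.List.min? (S.map (fun c => c.2)) (fun v => v) = some m := by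
    cases hm : PySem.List.min? (S.map (fun c => c.2)) (fun v => v) with
    | none => exact absurd ((PySem.List.min?_eq_none_iff _ _).1 hm) hne2
    | some m => exact ⟨m, rfl⟩
  obtain ⟨M2, hM2⟩ : ∃ m, PySem.List.max? (S.map (fun c => c.2)) (fun v => v) = some m := by
    cases hm : PySem.List.max? (S.map (fun c => c.2)) (fun v => v) with
    | none => exact absurd ((PySem.List.max?_eq_none_iff _ _).1 hm) hne2
    | some m => exact ⟨m, rfl⟩
  have h1 := PySem.List.min?_isMin hm1 _ hx
  have h2 := PySem.List.max?_isMax hM1 _ hx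
  have h3 := PySem.List.min?_isMin hm2 _ hy
  have h4 := PySem.List.max?_isMax hM2 _ hy
  simp only [pvX0, pvX1, pvY0, pvY1, hm1, hM1, hm2, hM2, Option.getD_some]
  omega

-- ---- the holes list ----
lemma pvMem_holes (S : List (Int × Int)) (h : Int × Int) :
    h ∈ pvHoles S ↔ (pvX0 S ≤ h.1 ∧ h.1 ≤ pvX1 S ∧ pvY0 S ≤ h.2 ∧ h.2 ≤ pvY1 S ∧ h ∉ S) := by
  simp only [pvHoles, List.mem_flatMap, List.mem_filterMap, PySem.List.mem_pyRange_one]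
  constructor
  · rintro ⟨hy, ⟨hy1, hy2⟩, hx, ⟨hx1, hx2⟩, heq⟩
    by_cases hcs : PySem.Set.contains S (hx, hy)
    · rw [if_pos hcs] at heq; exact absurd heq (by simp)
    · rw [if_neg hcs] at heq
      have he : (hx, hy) = h := by simpa using heq
      subst he
      refine ⟨by omega, by omega, by omega, by omega, ?_⟩
      simpa [PySem.Set.contains, List.contains_eq_mem] using hcs
  · rintro ⟨h1, h2, h3, h4, hns⟩
    refine ⟨h.2, ⟨h3, by omega⟩, h.1, ⟨h1, by omega⟩, ?_⟩
    have hcs : PySem.Set.contains S (h.1, h.2) = false := by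
      simp only [PySem.Set.contains, List.contains_eq_mem, decide_eq_false_iff_not]
      simpa using hns
    simp [PySem.Set.contains, List.contains_eq_mem, hns]

lemma pvCorner_mem (S : List (Int × Int)) (hne : S ≠ []) : (pvX0 S, pvY0 S) ∈ pvHoles S := by
  obtain ⟨c, hc⟩ := List.exists_mem_of_ne_nil S hne
  have hb := pvBounds S c hc
  rw [pvMem_holes]
  refine ⟨le_rfl, by omega, le_rfl, by omega, ?_⟩
  intro hmem
  have hb2 := pvBounds S _ hmem
  simp only at hb2
  omega

-- clamping a non-cell to the padded box does not increase its distance to any cell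
lemma pvClamp (S : List (Int × Int)) (c : Int × Int) (hc : c ∈ S)
    (q : Int × Int) (hq : q ∉ S) :
    ∃ h ∈ pvHoles S, pvDistN c h ≤ pvDistN c q := by
  have hb := pvBounds S c hc
  refine ⟨(max (pvX0 S) (min q.1 (pvX1 S)), max (pvY0 S) (min q.2 (pvY1 S))), ?_, ?_⟩
  · rw [pvMem_holes]
    refine ⟨le_max_left _ _, ?_, le_max_left _ _, ?_, ?_⟩
    · rcases le_total q.1 (pvX1 S) with h | h <;> rcases le_total (pvX0 S) (min q.1 (pvX1 S)) with h' | h' <;>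
        simp [max_eq_left, max_eq_right, min_eq_left, min_eq_right, *] <;> omega
    · rcases le_total q.2 (pvY1 S) with h | h <;> rcases le_total (pvY0 S) (min q.2 (pvY1 S)) with h' | h' <;>
        simp [max_eq_left, max_eq_right, min_eq_left, min_eq_right, *] <;> omega
    · intro hmem
      have hb2 := pvBounds S _ hmem
      simp only at hb2
      have e1 : max (pvX0 S) (min q.1 (pvX1 S)) = q.1 := by
        rcases max_cases (pvX0 S) (min q.1 (pvX1 S)) with ⟨he, _⟩ | ⟨he, _⟩ <;>
          rcases min_cases q.1 (pvX1 S) with ⟨he', _⟩ | ⟨he', _⟩ <;> omega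
      have e2 : max (pvY0 S) (min q.2 (pvY1 S)) = q.2 := by
        rcases max_cases (pvY0 S) (min q.2 (pvY1 S)) with ⟨he, _⟩ | ⟨he, _⟩ <;>
          rcases min_cases q.2 (pvY1 S) with ⟨he', _⟩ | ⟨he', _⟩ <;> omega
      rw [e1, e2] at hmem
      exact hq hmem
  · simp only [pvDistN]
    have a1 : (c.1 - max (pvX0 S) (min q.1 (pvX1 S))).natAbs ≤ (c.1 - q.1).natAbs := by
      rcases max_cases (pvX0 S) (min q.1 (pvX1 S)) with ⟨he, hle⟩ | ⟨he, hle⟩ <;>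
        rcases min_cases q.1 (pvX1 S) with ⟨he', hle'⟩ | ⟨he', hle'⟩ <;> rw [he] <;> omega
    have a2 : (c.2 - max (pvY0 S) (min q.2 (pvY1 S))).natAbs ≤ (c.2 - q.2).natAbs := by
      rcases max_cases (pvY0 S) (min q.2 (pvY1 S)) with ⟨he, hle⟩ | ⟨he, hle⟩ <;>
        rcases min_cases q.2 (pvY1 S) with ⟨he', hle'⟩ | ⟨he', hle'⟩ <;> rw [he] <;> omega
    omega

-- B's per-cell minimum is exactly the threshold of the ball predicate
lemma pvMD_spec (S : List (Int × Int)) (hne : S ≠ []) (c : Int × Int) (hc : c ∈ S) :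
    ∃ m : Nat, pvMD S c = (m : Int) ∧ (∀ k : Nat, pvBall S c k ↔ k < m) := by
  have hcorner := pvCorner_mem S hne
  obtain ⟨M, hM⟩ : ∃ M, PySem.List.min?
      ((pvHoles S).map (fun h => |c.1 - h.1| + |c.2 - h.2|)) (fun v => v) = some M := by
    cases hm : PySem.List.min? ((pvHoles S).map (fun h => |c.1 - h.1| + |c.2 - h.2|)) (fun v => v) with
    | none =>
        have := (PySem.List.min?_eq_none_iff _ _).1 hm
        rw [List.map_eq_nil_iff] at this
        rw [this] at hcorner
        exact absurd hcorner (by simp)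
    | some M => exact ⟨M, rfl⟩
  have hMmem := PySem.List.min?_mem hM
  have hMmin := PySem.List.min?_isMin hM
  obtain ⟨h0, hh0, hMe⟩ := List.mem_map.1 hMmem
  have hM0 : M = (pvDistN c h0 : Int) := by rw [← hMe, pvDist_cast]
  refine ⟨pvDistN c h0, by simp [pvMD, hM, hM0], ?_⟩
  intro k
  constructor
  · intro hball
    by_contra hk
    push_neg at hk
    have hh0S : h0 ∉ S := ((pvMem_holes S h0).1 hh0).2.2.2.2
    exact hh0S (hball h0 (by omega))
  · intro hk q hq
    by_contra hqS
    obtain ⟨h', hh', hd⟩ := pvClamp S c hc q hqS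
    have hmin := hMmin _ (List.mem_map_of_mem (f := fun h => |c.1 - h.1| + |c.2 - h.2|) hh')
    simp only [pvDist_cast] at hmin
    rw [hM0] at hmin
    omega

-- ---- assembling the distance-transform sum ----
lemma pvMain (S : List (Int × Int)) (hnd : S.Nodup) (hne : S ≠ []) :
    pvPeel (S.length + 1) S 0 = (S.map (pvMD S)).sum := by
  rw [pvPeel_eq_sum (S.length + 1) S 0 (by omega), zero_add]
  have h1 : (List.range (S.length + 1)).map (fun k => ((pvErode^[k] S).length : Int))
      = (List.range (S.length + 1)).map (fun k =>
          (S.map (fun c => if c ∈ pvErode^[k] S then (1:Int) else 0)).sum) := by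
    apply List.map_congr_left
    intro k _
    conv_lhs => rw [← pvFilter_sublist S (pvErode^[k] S) (pvIter_sublist S k) hnd]
    rw [pvLen_filter_int]
    refine congrArg List.sum (List.map_congr_left fun c _ => ?_)
    by_cases h : c ∈ pvErode^[k] S <;> simp [h]
  rw [h1, pvSum_comm]
  refine congrArg List.sum (List.map_congr_left fun c hc => ?_)
  obtain ⟨m, hmd, hiff⟩ := pvMD_spec S hne c hc
  have hnb : ¬ pvBall S c S.length := by
    intro hb
    have hm := (pvIter_mem S S.length c).2 hb
    rw [pvIter_empty S.length S le_rfl] at hm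
    exact absurd hm (by simp)
  have hmle : m ≤ S.length := by
    by_contra hgt
    exact hnb ((hiff S.length).2 (by omega))
  have h2 : (List.range (S.length + 1)).map (fun k => if c ∈ pvErode^[k] S then (1:Int) else 0)
      = (List.range (S.length + 1)).map (fun k => if k < m then (1:Int) else 0) := by
    apply List.map_congr_left
    intro k _
    have hik : c ∈ pvErode^[k] S ↔ k < m := (pvIter_mem S k c).trans (hiff k)
    by_cases h : k < m
    · simp [hik.2 h, h]
    · have hnm : c ∉ pvErode^[k] S := fun hm => h (hik.1 hm)
      simp [hnm, h]
  rw [h2, pvRange_count _ m (by omega), hmd]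

-- B's program, phrased through the standalone definitions above
lemma part1_alt_eq (data : String) :
    part1_alt data = if (pvB_gen data).isEmpty then 0
      else ((pvB_gen data).map (pvMD (pvB_gen data))).sum := by
  unfold part1_alt
  rw [pvSet_ofList_nodup _ (pvB_gen_nodup data)]
  rfl

lemma part1_eq_alt (data : String) : part1 data = part1_alt data := by
  rw [part1_eq_peel, part1_alt_eq]
  rcases eq_or_ne (pvB_gen data) [] with hnil | hne
  · rw [hnil]
    simp [pvPeel_nil]
  · rw [if_neg (by simpa [List.isEmpty_iff] using hne)]
    exact pvMain _ (pvB_gen_nodup data) hne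

-- ===== VERDICT (by name: the statement is the Claim_ definition above) =====
theorem part1_spec : Claim_equal_part1 := by
  intro data _
  unfold Spec_part1
  exact part1_eq_alt data
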